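-- pv_equiv track=rewrite | github.com/Shaurya200401/srm_coding_round_template | q1.py | first_stable_character
-- ===== SOURCE A (Python) =====
-- def first_stable_character(s):
--     """
--     Find the first stable character in the string.
--
--     A character is stable if:
--     1. It appears at least twice
--     2. All occurrences are in one continuous group
--
--     Args:
--         s (str): Input string
--
--     Returns:
--         str or None: First stable character, or None if no stable character exists
--
--     Examples:
--         >>> first_stable_character("abccba")
--         'c'
--         >>> first_stable_character("abc")
--         None
--         >>> first_stable_character("a")
--         None
--     """
--     # I'm tracking the first and last occurrence of each character
--     first_occurrence = {}
--     last_occurrence = {}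
--
--
--     for i, char in enumerate(s):
--         if char not in first_occurrence:
--             first_occurrence[char] = i
--         last_occurrence[char] = i
--
--     # Checking characters in order of appearance
--     for i, char in enumerate(s):
--         # character stable if (first != last)
--         if first_occurrence[char] != last_occurrence[char] and i == first_occurrence[char]:
--             # Checking if all occurrences are continuous
--             char_count = last_occurrence[char] - first_occurrence[char] + 1
--             if s[first_occurrence[char]:last_occurrence[char]+1].count(char) == char_count:
--                 return char
--
--     return None
-- ===== SOURCE B (Python) =====
-- def first_stable_character(s):
--     # One pass: per character record (first index, last index, total count).
--     # A character is stable iff count >= 2 and count == last - first + 1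
--     # (all occurrences form one contiguous block). Dict preserves first-
--     # occurrence order, so the first qualifying entry is the answer.
--     info = {}
--     for i, ch in enumerate(s):
--         if ch in info:
--             f, _, c = info[ch]
--             info[ch] = (f, i, c + 1)
--         else:
--             info[ch] = (i, i, 1)
--     for ch, (f, l, c) in info.items():
--         if c >= 2 and c == l - f + 1:
--             return ch
--     return None
-- ===== Notes on version B (the rewrite author's own statement) =====
-- stated objective: alternative
-- what changed: Replaces A's second full scan of the string with per-candidate slicing-and-counting by a single pass that records (first, last, count) per character and then checks count == last-first+1 over the dict entries; on an alphabet that grows with the input this drops O(n*alphabet) slice work to O(n).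
import Mathlib
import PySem

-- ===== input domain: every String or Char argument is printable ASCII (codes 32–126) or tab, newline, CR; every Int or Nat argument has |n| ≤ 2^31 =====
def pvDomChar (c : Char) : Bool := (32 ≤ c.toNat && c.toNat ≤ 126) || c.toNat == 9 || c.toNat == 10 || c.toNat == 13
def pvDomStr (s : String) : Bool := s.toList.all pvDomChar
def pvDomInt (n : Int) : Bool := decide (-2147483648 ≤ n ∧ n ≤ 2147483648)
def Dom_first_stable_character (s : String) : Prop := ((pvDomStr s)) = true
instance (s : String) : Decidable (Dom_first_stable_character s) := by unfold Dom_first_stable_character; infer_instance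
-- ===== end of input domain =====

-- One honest line: B replaces A's second scan with slicing/counting per candidate by a
-- single pass recording (first, last, count) per character, then checks count = last-first+1
-- over the dict entries (alternative algorithm; equal return value proved below).

-- ===== PORT A =====
-- the second 'for i, char in enumerate(s):' loop of A, with l the full character list
def pvLoopA (fo lo : PySem.Dict Char Int) (l : List Char) : List (Int × Char) → Option String
  | [] => none
  | (i, c) :: rest =>
    if fo.getD c 0 ≠ lo.getD c 0 ∧ i = fo.getD c 0 then
      let char_count := lo.getD c 0 - fo.getD c 0 + 1
      if ((PySem.List.slice l (some (fo.getD c 0)) (some (lo.getD c 0 + 1))).count c : Int) = char_count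
      then some (String.ofList [c])
      else pvLoopA fo lo l rest
    else pvLoopA fo lo l rest

def first_stable_character (s : String) : Option String :=
  let l := s.toList
  let st := (PySem.List.enumerate l 0).foldl
    (fun (p : PySem.Dict Char Int × PySem.Dict Char Int) ic =>
      ((if p.1.contains ic.2 then p.1 else p.1.insert ic.2 ic.1), p.2.insert ic.2 ic.1))
    (PySem.Dict.empty, PySem.Dict.empty)
  pvLoopA st.1 st.2 l (PySem.List.enumerate l 0)

-- ===== PORT B =====
-- the 'for ch, (f, l, c) in info.items():' loop of B
def pvLoopB : List (Char × Int × Int × Int) → Option String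
  | [] => none
  | (ch, f, la, c) :: rest =>
    if 2 ≤ c ∧ c = la - f + 1 then some (String.ofList [ch]) else pvLoopB rest

def first_stable_character_alt (s : String) : Option String :=
  let info := (PySem.List.enumerate s.toList 0).foldl
    (fun (d : PySem.Dict Char (Int × Int × Int)) ic =>
      d.insert ic.2 (match d.get? ic.2 with
        | some (f, _, c) => (f, ic.1, c + 1)
        | none => (ic.1, ic.1, 1)))
    PySem.Dict.empty
  pvLoopB info.items

-- ===== PRECONDITION & SPEC =====
def Spec_first_stable_character (s : String) (out : Option String) : Prop := out = first_stable_character_alt s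
instance (s : String) (out : Option String) : Decidable (Spec_first_stable_character s out) := by unfold Spec_first_stable_character; infer_instance

-- ===== CLAIM (what is proved, stated in full; the proofs are below) =====
def Claim_equal_first_stable_character : Prop := ∀ (s : String), Dom_first_stable_character s → Spec_first_stable_character s (first_stable_character s)

-- ===== LEMMAS AND PROOFS =====

-- index of the LAST occurrence of c in l (proof-side helper)
def pvLast? : List Char → Char → Option Nat
  | [], _ => none
  | x :: xs, c =>
    match pvLast? xs c with
    | some k => some (k + 1)
    | none => if x = c then some 0 else none

-- first / last occurrence index of c in l, as Int (only meaningful when c ∈ l)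
def pvF (l : List Char) (c : Char) : Int := (((PySem.List.index? l c).getD 0 : Nat) : Int)
def pvL (l : List Char) (c : Char) : Int := (((pvLast? l c).getD 0 : Nat) : Int)

theorem pvLast?_isSome_iff (l : List Char) (c : Char) : (pvLast? l c).isSome ↔ c ∈ l := by
  induction l with
  | nil => simp [pvLast?]
  | cons x xs ih =>
    simp only [pvLast?]
    cases h : pvLast? xs c with
    | some k => simp [h] at ih ⊢; exact Or.inr ih
    | none =>
      simp [h] at ih
      by_cases hxc : x = c
      · simp [hxc, ih]
      · simp [hxc, ih]; exact fun hcx => hxc hcx.symm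

theorem pvLast?_append_singleton (t : List Char) (x c : Char) :
    pvLast? (t ++ [x]) c = if x = c then some t.length else pvLast? t c := by
  induction t with
  | nil => simp [pvLast?]
  | cons y ys ih =>
    simp only [List.cons_append, pvLast?, ih]
    by_cases hxc : x = c
    · simp [hxc]
    · simp [hxc]

theorem pvLast?_spec (l : List Char) (c : Char) (k : Nat) (h : pvLast? l c = some k) :
    ∃ (hk : k < l.length), l[k] = c ∧ ∀ j (hj : j < l.length), k < j → l[j] ≠ c := by
  induction l generalizing k with
  | nil => simp [pvLast?] at h
  | cons x xs ih =>
    cases h' : pvLast? xs c with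
    | some m =>
      simp only [pvLast?, h'] at h
      obtain rfl : m + 1 = k := by simpa using h
      obtain ⟨hm, hx, hrest⟩ := ih m h'
      refine ⟨by simpa using Nat.succ_lt_succ hm, by simpa using hx, ?_⟩
      intro j hj hlt
      cases j with
      | zero => omega
      | succ j' =>
        simp only [List.getElem_cons_succ]
        exact hrest j' (by simpa using hj) (by omega)
    | none =>
      simp only [pvLast?, h'] at h
      by_cases hxc : x = c
      · rw [if_pos hxc] at h
        obtain rfl : k = 0 := by simpa using h.symm
        refine ⟨by simp, by simpa using hxc, ?_⟩
        intro j hj hlt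
        cases j with
        | zero => omega
        | succ j' =>
          simp only [List.getElem_cons_succ]
          intro hc
          have hmem : c ∈ xs := by subst hc; exact List.getElem_mem _
          rw [← pvLast?_isSome_iff] at hmem
          simp [h'] at hmem
      · simp [hxc] at h


theorem pvF_append_of_mem (t : List Char) (x c : Char) (h : c ∈ t) : pvF (t ++ [x]) c = pvF t c := by
  unfold pvF; rw [PySem.List.index?_append_of_mem [x] h]

theorem pvF_append_self (t : List Char) (x : Char) (h : x ∉ t) : pvF (t ++ [x]) x = (t.length : Int) := by
  unfold pvF; rw [PySem.List.index?_append_singleton_self t x h]; rfl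

theorem pvF_append_of_ne (t : List Char) (x c : Char) (h : c ≠ x) : pvF (t ++ [x]) c = pvF t c := by
  by_cases hm : c ∈ t
  · exact pvF_append_of_mem t x c hm
  · unfold pvF
    have h1 : PySem.List.index? (t ++ [x]) c = none := by
      rw [PySem.List.index?_eq_none_iff]; simp [hm, h]
    have h2 : PySem.List.index? t c = none := by rw [PySem.List.index?_eq_none_iff]; exact hm
    rw [h1, h2]

theorem pvL_append_self (t : List Char) (x : Char) : pvL (t ++ [x]) x = (t.length : Int) := by
  unfold pvL; rw [pvLast?_append_singleton]; simp

theorem pvL_append_of_ne (t : List Char) (x c : Char) (h : c ≠ x) : pvL (t ++ [x]) c = pvL t c := by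
  unfold pvL; rw [pvLast?_append_singleton, if_neg (fun hxc : x = c => h hxc.symm)]


theorem pvMem_take_iff (L : List Char) (m : Nat) (c : Char) :
    c ∈ L.take m ↔ ∃ j, ∃ (hj : j < L.length), j < m ∧ L[j] = c := by
  constructor
  · intro h
    obtain ⟨j, hj, hje⟩ := List.getElem_of_mem h
    have hjl : j < L.length := lt_of_lt_of_le hj (by simp [List.length_take])
    have hjm : j < m := lt_of_lt_of_le hj (by simp [List.length_take])
    exact ⟨j, hjl, hjm, by rw [List.getElem_take] at hje; exact hje⟩
  · rintro ⟨j, hj, hjm, rfl⟩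
    have hlen : j < (L.take m).length := by simp [List.length_take]; omega
    have : (L.take m)[j] = L[j] := List.getElem_take
    exact this ▸ List.getElem_mem hlen

theorem pvMem_drop_iff (L : List Char) (m : Nat) (c : Char) :
    c ∈ L.drop m ↔ ∃ j, ∃ (hj : m + j < L.length), L[m + j] = c := by
  constructor
  · intro h
    obtain ⟨j, hj, hje⟩ := List.getElem_of_mem h
    have hjl : m + j < L.length := by simp [List.length_drop] at hj; omega
    exact ⟨j, hjl, by rw [List.getElem_drop] at hje; exact hje⟩
  · rintro ⟨j, hj, rfl⟩
    have hlen : j < (L.drop m).length := by simp [List.length_drop]; omega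
    have : (L.drop m)[j] = L[m + j] := List.getElem_drop
    exact this ▸ List.getElem_mem hlen

-- the packaged facts about the first and last occurrence of c ∈ l
theorem pvFL_facts (l : List Char) (c : Char) (hc : c ∈ l) :
    ∃ f la, PySem.List.index? l c = some f ∧ pvLast? l c = some la ∧
      pvF l c = (f : Int) ∧ pvL l c = (la : Int) ∧ f ≤ la ∧
      ∃ (hf : f < l.length) (hla : la < l.length), l[f] = c ∧ l[la] = c ∧
        (∀ j (hj : j < l.length), j < f → l[j] ≠ c) ∧
        (∀ j (hj : j < l.length), la < j → l[j] ≠ c) := by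
  obtain ⟨f, hf⟩ := Option.isSome_iff_exists.mp ((PySem.List.index?_isSome_iff l c).mpr hc)
  obtain ⟨la, hla⟩ := Option.isSome_iff_exists.mp ((pvLast?_isSome_iff l c).mpr hc)
  obtain ⟨hflt, hfe, hmin⟩ := PySem.List.getElem_of_index?_eq_some hf
  obtain ⟨hlalt, hlae, hmax⟩ := pvLast?_spec l c la hla
  have hfla : f ≤ la := by
    by_contra hcon
    exact hmax f hflt (by omega) hfe
  exact ⟨f, la, hf, hla, by unfold pvF; rw [hf]; rfl, by unfold pvL; rw [hla]; rfl, hfla,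
    hflt, hlalt, hfe, hlae, fun j hj hjf => hmin j hjf, hmax⟩

theorem pvF_getElem_eq (L : List Char) (n : Nat) (hn : n < L.length) (h : L[n] ∉ L.take n) :
    PySem.List.index? L (L[n]) = some n := by
  obtain ⟨f, la, hf, _, _, _, _, hflt, _, hfe, _, hmin, _⟩ :=
    pvFL_facts L (L[n]) (List.getElem_mem hn)
  have hfn : f = n := by
    rcases Nat.lt_trichotomy f n with hlt | heq | hgt
    · exact absurd ((pvMem_take_iff L n (L[n])).mpr ⟨f, hflt, hlt, hfe⟩) h
    · exact heq
    · exact absurd rfl (hmin n hn hgt)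
  rw [hfn] at hf; exact hf

theorem pvF_ne_of_mem_take (L : List Char) (n : Nat) (hn : n < L.length) (h : L[n] ∈ L.take n) :
    pvF L (L[n]) ≠ (n : Int) := by
  obtain ⟨j, hj, hjn, hje⟩ := (pvMem_take_iff L n (L[n])).mp h
  obtain ⟨f, la, hf, _, hpf, _, _, hflt, _, hfe, _, hmin, _⟩ :=
    pvFL_facts L (L[n]) (List.getElem_mem hn)
  have : f ≤ j := by
    by_contra hcon
    exact hmin j hj (by omega) hje
  rw [hpf]
  intro hcast
  have : f = n := by exact_mod_cast hcast
  omega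

-- characterization of the two dictionaries A builds in its first loop
theorem pvFoldA_get? (l : List Char) (c : Char) :
    (((PySem.List.enumerate l 0).foldl
      (fun (p : PySem.Dict Char Int × PySem.Dict Char Int) ic =>
        ((if p.1.contains ic.2 then p.1 else p.1.insert ic.2 ic.1), p.2.insert ic.2 ic.1))
      (PySem.Dict.empty, PySem.Dict.empty)).1.get? c
        = (PySem.List.index? l c).map (fun k => (k : Int)))
    ∧ (((PySem.List.enumerate l 0).foldl
      (fun (p : PySem.Dict Char Int × PySem.Dict Char Int) ic =>
        ((if p.1.contains ic.2 then p.1 else p.1.insert ic.2 ic.1), p.2.insert ic.2 ic.1))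
      (PySem.Dict.empty, PySem.Dict.empty)).2.get? c
        = (pvLast? l c).map (fun k => (k : Int))) := by
  induction l using List.reverseRecOn generalizing c with
  | nil => simp [PySem.List.enumerate_nil, PySem.Dict.get?_empty, pvLast?]
  | append_singleton t x ih =>
    rw [PySem.List.enumerate_append]
    simp only [List.foldl_append, PySem.List.enumerate_cons, PySem.List.enumerate_nil,
      List.foldl_cons, List.foldl_nil]
    have hcont : ∀ y : Char, (((PySem.List.enumerate t 0).foldl
        (fun (p : PySem.Dict Char Int × PySem.Dict Char Int) ic =>
          ((if p.1.contains ic.2 then p.1 else p.1.insert ic.2 ic.1), p.2.insert ic.2 ic.1))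
        (PySem.Dict.empty, PySem.Dict.empty)).1.contains y) = decide (y ∈ t) := by
      intro y
      rw [PySem.Dict.contains_eq_isSome_get?, (ih y).1]
      rcases hm : PySem.List.index? t y with _ | k
      · rw [PySem.List.index?_eq_none_iff] at hm; simp [hm]
      · have : y ∈ t := by rw [← PySem.List.index?_isSome_iff, hm]; rfl
        simp [this]
    constructor
    · rw [hcont x]
      by_cases hx : x ∈ t
      · rw [if_pos (by simp [hx])]
        rw [(ih c).1]
        by_cases hcx : c = x
        · rw [hcx, PySem.List.index?_append_of_mem [x] hx]
        · by_cases hct : c ∈ t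
          · rw [PySem.List.index?_append_of_mem [x] hct]
          · rw [(PySem.List.index?_eq_none_iff t c).mpr hct,
              (PySem.List.index?_eq_none_iff (t ++ [x]) c).mpr (by simp [hct, hcx])]
      · rw [if_neg (by simp [hx])]
        by_cases hcx : c = x
        · rw [hcx, PySem.Dict.get?_insert_self, PySem.List.index?_append_singleton_self t x hx]
          simp
        · rw [PySem.Dict.get?_insert_of_ne _ _ hcx, (ih c).1]
          by_cases hct : c ∈ t
          · rw [PySem.List.index?_append_of_mem [x] hct]
          · rw [(PySem.List.index?_eq_none_iff t c).mpr hct,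
              (PySem.List.index?_eq_none_iff (t ++ [x]) c).mpr (by simp [hct, hcx])]
    · by_cases hcx : c = x
      · rw [hcx, PySem.Dict.get?_insert_self, pvLast?_append_singleton, if_pos rfl]
        simp
      · rw [PySem.Dict.get?_insert_of_ne _ _ hcx, (ih c).2,
          pvLast?_append_singleton, if_neg (fun h => hcx h.symm)]

-- total dict lookups A performs in its second loop, for characters of the string
theorem pvFoldA_getD (l : List Char) (c : Char) (hc : c ∈ l) :
    (((PySem.List.enumerate l 0).foldl
      (fun (p : PySem.Dict Char Int × PySem.Dict Char Int) ic =>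
        ((if p.1.contains ic.2 then p.1 else p.1.insert ic.2 ic.1), p.2.insert ic.2 ic.1))
      (PySem.Dict.empty, PySem.Dict.empty)).1.getD c 0 = pvF l c)
    ∧ (((PySem.List.enumerate l 0).foldl
      (fun (p : PySem.Dict Char Int × PySem.Dict Char Int) ic =>
        ((if p.1.contains ic.2 then p.1 else p.1.insert ic.2 ic.1), p.2.insert ic.2 ic.1))
      (PySem.Dict.empty, PySem.Dict.empty)).2.getD c 0 = pvL l c) := by
  obtain ⟨h1, h2⟩ := pvFoldA_get? l c
  obtain ⟨f, hf⟩ := Option.isSome_iff_exists.mp ((PySem.List.index?_isSome_iff l c).mpr hc)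
  obtain ⟨la, hla⟩ := Option.isSome_iff_exists.mp ((pvLast?_isSome_iff l c).mpr hc)
  constructor
  · rw [PySem.Dict.getD_eq_get?_getD, h1, hf]; unfold pvF; rw [hf]; rfl
  · rw [PySem.Dict.getD_eq_get?_getD, h2, hla]; unfold pvL; rw [hla]; rfl

-- characterization of the dictionary B builds
theorem pvFoldB_get? (l : List Char) (c : Char) :
    ((PySem.List.enumerate l 0).foldl
      (fun (d : PySem.Dict Char (Int × Int × Int)) ic =>
        d.insert ic.2 (match d.get? ic.2 with
          | some (f, _, c) => (f, ic.1, c + 1)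
          | none => (ic.1, ic.1, 1)))
      PySem.Dict.empty).get? c
      = if c ∈ l then some (pvF l c, pvL l c, (l.count c : Int)) else none := by
  induction l using List.reverseRecOn with
  | nil => simp [PySem.List.enumerate_nil, PySem.Dict.get?_empty]
  | append_singleton t x ih =>
    rw [PySem.List.enumerate_append]
    simp only [List.foldl_append, PySem.List.enumerate_cons, PySem.List.enumerate_nil,
      List.foldl_cons, List.foldl_nil]
    by_cases hcx : c = x
    · subst hcx
      rw [PySem.Dict.get?_insert_self, ih]
      by_cases hm : c ∈ t
      · rw [if_pos hm, if_pos (by simp [hm])]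
        rw [pvF_append_of_mem t c c hm, pvL_append_self]
        simp [List.count_append]
      · rw [if_neg hm, if_pos (by simp)]
        rw [pvF_append_self t c hm, pvL_append_self]
        have : List.count c t = 0 := List.count_eq_zero.mpr hm
        simp [List.count_append, this]
    · rw [PySem.Dict.get?_insert_of_ne _ _ hcx, ih]
      have hmem : (c ∈ t ++ [x]) ↔ c ∈ t := by simp [hcx]
      by_cases hm : c ∈ t
      · rw [if_pos hm, if_pos (hmem.mpr hm)]
        rw [pvF_append_of_ne t x c hcx, pvL_append_of_ne t x c hcx]
        have : List.count c [x] = 0 := List.count_eq_zero.mpr (by simp [hcx])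
        simp [List.count_append, this]
      · rw [if_neg hm, if_neg (fun h => hm (hmem.mp h))]

theorem pvFoldB_keys (l : List Char) :
    ((PySem.List.enumerate l 0).foldl
      (fun (d : PySem.Dict Char (Int × Int × Int)) ic =>
        d.insert ic.2 (match d.get? ic.2 with
          | some (f, _, c) => (f, ic.1, c + 1)
          | none => (ic.1, ic.1, 1)))
      PySem.Dict.empty).keys = PySem.Set.ofList l := by
  rw [PySem.Dict.keys_foldl_insert_key]
  rw [PySem.List.map_snd_enumerate]
  rw [PySem.Set.ofList_eq_foldl]
  rfl

theorem pvFoldB_items (l : List Char) :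
    ((PySem.List.enumerate l 0).foldl
      (fun (d : PySem.Dict Char (Int × Int × Int)) ic =>
        d.insert ic.2 (match d.get? ic.2 with
          | some (f, _, c) => (f, ic.1, c + 1)
          | none => (ic.1, ic.1, 1)))
      PySem.Dict.empty).items
      = (PySem.Set.ofList l).map (fun c => (c, pvF l c, pvL l c, (l.count c : Int))) := by
  have hnd : ((PySem.List.enumerate l 0).foldl
      (fun (d : PySem.Dict Char (Int × Int × Int)) ic =>
        d.insert ic.2 (match d.get? ic.2 with
          | some (f, _, c) => (f, ic.1, c + 1)
          | none => (ic.1, ic.1, 1)))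
      PySem.Dict.empty).keys.Nodup := by
    apply PySem.Dict.nodup_keys_foldl_insert_key
    simp [PySem.Dict.keys_empty]
  rw [PySem.Dict.items_eq_map_keys _ hnd (0, 0, 0), pvFoldB_keys]
  apply List.map_congr_left
  intro c hc
  have hcl : c ∈ l := (PySem.Set.mem_ofList l c).mp hc
  have hg := pvFoldB_get? l c
  rw [if_pos hcl] at hg
  rw [PySem.Dict.getD_of_get?_eq_some _ _ hg]

-- A's scanning loop is find-first over the filtered list
theorem pvLoopA_eq (fo lo : PySem.Dict Char Int) (l : List Char) (es : List (Int × Char)) :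
    pvLoopA fo lo l es
      = ((es.filter (fun ic =>
            decide (fo.getD ic.2 0 ≠ lo.getD ic.2 0 ∧ ic.1 = fo.getD ic.2 0)
            && decide (((PySem.List.slice l (some (fo.getD ic.2 0)) (some (lo.getD ic.2 0 + 1))).count ic.2 : Int)
                 = lo.getD ic.2 0 - fo.getD ic.2 0 + 1))).head?).map
          (fun ic => String.ofList [ic.2]) := by
  induction es with
  | nil => rfl
  | cons e rest ih =>
    obtain ⟨i, c⟩ := e
    by_cases h1 : fo.getD c 0 ≠ lo.getD c 0 ∧ i = fo.getD c 0
    · by_cases h2 : ((PySem.List.slice l (some (fo.getD c 0)) (some (lo.getD c 0 + 1))).count c : Int)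
          = lo.getD c 0 - fo.getD c 0 + 1
      · simp [pvLoopA, h1, h2]
      · simp [pvLoopA, h1, h2, ih]
    · simp [pvLoopA, h1, ih]

theorem pvLoopB_eq (es : List (Char × Int × Int × Int)) :
    pvLoopB es
      = ((es.filter (fun p => decide (2 ≤ p.2.2.2 ∧ p.2.2.2 = p.2.2.1 - p.2.1 + 1))).head?).map
          (fun p => String.ofList [p.1]) := by
  induction es with
  | nil => rfl
  | cons e rest ih =>
    obtain ⟨ch, f, la, c⟩ := e
    simp only [pvLoopB, List.filter_cons]
    by_cases h : 2 ≤ c ∧ c = la - f + 1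
    · rw [if_pos h, if_pos (by simpa using h)]
      simp
    · rw [if_neg h, if_neg (by simpa using h), ih]

-- first-occurrence entries of the enumeration, in order, are the distinct characters
theorem pvFilter_enum (L : List Char) (p : Char → Bool) (n : Nat) (hn : n ≤ L.length) :
    ((PySem.List.enumerate (L.take n) 0).filter
        (fun ic => decide (ic.1 = pvF L ic.2) && p ic.2)).map (·.2)
      = (PySem.Set.ofList (L.take n)).filter p := by
  induction n with
  | zero => simp [PySem.List.enumerate_nil, PySem.Set.ofList_eq_foldl]
  | succ m ih =>
    have hmlt : m < L.length := hn
    have hm : m ≤ L.length := le_of_lt hmlt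
    have htake : L.take (m + 1) = L.take m ++ [L[m]] := by
      rw [List.take_add_one, List.getElem?_eq_getElem hmlt]
      rfl
    have hlen : (L.take m).length = m := by simp [List.length_take]; omega
    rw [htake, PySem.List.enumerate_append, hlen, List.filter_append, List.map_append, ih hm]
    have hofl : PySem.Set.ofList (L.take m ++ [L[m]])
        = PySem.Set.add (PySem.Set.ofList (L.take m)) (L[m]) := by
      rw [PySem.Set.ofList_eq_foldl, PySem.Set.ofList_eq_foldl, List.foldl_append]
      rfl
    rw [hofl]
    by_cases hmem : L[m] ∈ L.take m
    · have hadd : PySem.Set.add (PySem.Set.ofList (L.take m)) (L[m])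
          = PySem.Set.ofList (L.take m) := by
        simp [PySem.Set.add, hmem]
      have hcond : (decide ((0 : Int) + (m : Int) = pvF L (L[m])) && p (L[m])) = false := by
        have hne := pvF_ne_of_mem_take L m hmlt hmem
        simp only [zero_add]
        simp
        intro h
        exact absurd h.symm hne
      simp only [PySem.List.enumerate_cons, PySem.List.enumerate_nil, List.filter_cons,
        List.filter_nil, hcond, hadd]
      simp
    · have hadd : PySem.Set.add (PySem.Set.ofList (L.take m)) (L[m])
          = PySem.Set.ofList (L.take m) ++ [L[m]] := by
        simp [PySem.Set.add, hmem]
      have hpv : pvF L (L[m]) = (m : Int) := by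
        unfold pvF; rw [pvF_getElem_eq L m hmlt hmem]; rfl
      have hcond : (decide ((0 : Int) + (m : Int) = pvF L (L[m])) && p (L[m])) = p (L[m]) := by
        simp [hpv]
      simp only [PySem.List.enumerate_cons, PySem.List.enumerate_nil, List.filter_cons,
        List.filter_nil, hcond, hadd, List.filter_append]
      by_cases hp : p (L[m]) = true
      · simp [hp]
      · simp [hp]

-- the slice from first to last occurrence contains every occurrence
theorem pvSlice_count (l : List Char) (c : Char) (hc : c ∈ l) :
    ((PySem.List.slice l (some (pvF l c)) (some (pvL l c + 1))).count c : Int) = (l.count c : Int) := by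
  obtain ⟨f, la, hf, hla, hpf, hpl, hfla, hflt, hlalt, hfe, hlae, hmin, hmax⟩ := pvFL_facts l c hc
  rw [hpf, hpl]
  have hcast : ((la : Int) + 1) = ((la + 1 : Nat) : Int) := by push_cast; ring
  rw [hcast, PySem.List.slice_natCast]
  have htake0 : List.count c (l.take f) = 0 := by
    rw [List.count_eq_zero]
    intro hmem
    obtain ⟨j, hj, hjf, hje⟩ := (pvMem_take_iff l f c).mp hmem
    exact hmin j hj hjf hje
  have hdrop0 : List.count c (l.drop (la + 1)) = 0 := by
    rw [List.count_eq_zero]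
    intro hmem
    obtain ⟨j, hj, hje⟩ := (pvMem_drop_iff l (la + 1) c).mp hmem
    exact hmax (la + 1 + j) hj (by omega) hje
  have hsplit : List.count c l = List.count c (l.take f) + List.count c (l.drop f) := by
    conv_lhs => rw [← List.take_append_drop f l]
    rw [List.count_append]
  have hsplit2 : List.count c (l.drop f)
      = List.count c ((l.drop f).take (la + 1 - f)) + List.count c (l.drop (la + 1)) := by
    conv_lhs => rw [← List.take_append_drop (la + 1 - f) (l.drop f)]
    rw [List.count_append, List.drop_drop]
    have harith : f + (la + 1 - f) = la + 1 := by omega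
    rw [harith]
  have : List.count c ((l.drop f).take (la + 1 - f)) = List.count c l := by
    omega
  rw [this]

theorem pvTwo_iff (l : List Char) (c : Char) (hc : c ∈ l) :
    (pvF l c ≠ pvL l c) ↔ 2 ≤ (l.count c : Int) := by
  obtain ⟨f, la, hf, hla, hpf, hpl, hfla, hflt, hlalt, hfe, hlae, hmin, hmax⟩ := pvFL_facts l c hc
  rw [hpf, hpl]
  have htake0 : List.count c (l.take f) = 0 := by
    rw [List.count_eq_zero]
    intro hmem
    obtain ⟨j, hj, hjf, hje⟩ := (pvMem_take_iff l f c).mp hmem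
    exact hmin j hj hjf hje
  constructor
  · intro hne
    have hlt : f < la := lt_of_le_of_ne hfla (fun h => hne (by exact_mod_cast h))
    have h1 : 0 < List.count c (l.take la) :=
      List.count_pos_iff.mpr ((pvMem_take_iff l la c).mpr ⟨f, hflt, hlt, hfe⟩)
    have h2 : l.drop la = c :: l.drop (la + 1) := by
      rw [List.drop_eq_getElem_cons hlalt, hlae]
    have : List.count c l = List.count c (l.take la) + List.count c (l.drop la) := by
      conv_lhs => rw [← List.take_append_drop la l]
      rw [List.count_append]
    rw [h2, List.count_cons_self] at this
    have : 2 ≤ List.count c l := by omega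
    exact_mod_cast this
  · intro h2 hne
    have hfeq : f = la := by exact_mod_cast hne
    subst hfeq
    have hdrop0 : List.count c (l.drop (f + 1)) = 0 := by
      rw [List.count_eq_zero]
      intro hmem
      obtain ⟨j, hj, hje⟩ := (pvMem_drop_iff l (f + 1) c).mp hmem
      exact hmax (f + 1 + j) hj (by omega) hje
    have hdx : l.drop f = c :: l.drop (f + 1) := by
      rw [List.drop_eq_getElem_cons hflt, hfe]
    have : List.count c l = List.count c (l.take f) + List.count c (l.drop f) := by
      conv_lhs => rw [← List.take_append_drop f l]
      rw [List.count_append]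
    rw [hdx, List.count_cons_self] at this
    have : List.count c l = 1 := by omega
    omega

-- ===== VERDICT (by name: the statement is the Claim_ definition above) =====
theorem first_stable_character_spec : Claim_equal_first_stable_character := by
  unfold Claim_equal_first_stable_character
  intro s _
  unfold Spec_first_stable_character first_stable_character first_stable_character_alt
  simp only []
  rw [pvLoopA_eq, pvLoopB_eq, pvFoldB_items]
  generalize s.toList = l
  have hfilA : List.filter
      (fun ic : Int × Char =>
        decide (((PySem.List.enumerate l 0).foldl
            (fun (p : PySem.Dict Char Int × PySem.Dict Char Int) ic =>
              ((if p.1.contains ic.2 then p.1 else p.1.insert ic.2 ic.1), p.2.insert ic.2 ic.1))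
            (PySem.Dict.empty, PySem.Dict.empty)).1.getD ic.2 0
          ≠ ((PySem.List.enumerate l 0).foldl
            (fun (p : PySem.Dict Char Int × PySem.Dict Char Int) ic =>
              ((if p.1.contains ic.2 then p.1 else p.1.insert ic.2 ic.1), p.2.insert ic.2 ic.1))
            (PySem.Dict.empty, PySem.Dict.empty)).2.getD ic.2 0
          ∧ ic.1 = ((PySem.List.enumerate l 0).foldl
            (fun (p : PySem.Dict Char Int × PySem.Dict Char Int) ic =>
              ((if p.1.contains ic.2 then p.1 else p.1.insert ic.2 ic.1), p.2.insert ic.2 ic.1))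
            (PySem.Dict.empty, PySem.Dict.empty)).1.getD ic.2 0)
        && decide (((List.count ic.2 (PySem.List.slice l
              (some (((PySem.List.enumerate l 0).foldl
                (fun (p : PySem.Dict Char Int × PySem.Dict Char Int) ic =>
                  ((if p.1.contains ic.2 then p.1 else p.1.insert ic.2 ic.1), p.2.insert ic.2 ic.1))
                (PySem.Dict.empty, PySem.Dict.empty)).1.getD ic.2 0))
              (some (((PySem.List.enumerate l 0).foldl
                (fun (p : PySem.Dict Char Int × PySem.Dict Char Int) ic =>
                  ((if p.1.contains ic.2 then p.1 else p.1.insert ic.2 ic.1), p.2.insert ic.2 ic.1))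
                (PySem.Dict.empty, PySem.Dict.empty)).2.getD ic.2 0 + 1)))) : Int)
          = ((PySem.List.enumerate l 0).foldl
              (fun (p : PySem.Dict Char Int × PySem.Dict Char Int) ic =>
                ((if p.1.contains ic.2 then p.1 else p.1.insert ic.2 ic.1), p.2.insert ic.2 ic.1))
              (PySem.Dict.empty, PySem.Dict.empty)).2.getD ic.2 0
            - ((PySem.List.enumerate l 0).foldl
              (fun (p : PySem.Dict Char Int × PySem.Dict Char Int) ic =>
                ((if p.1.contains ic.2 then p.1 else p.1.insert ic.2 ic.1), p.2.insert ic.2 ic.1))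
              (PySem.Dict.empty, PySem.Dict.empty)).1.getD ic.2 0 + 1))
      (PySem.List.enumerate l 0)
    = List.filter
      (fun ic : Int × Char => decide (ic.1 = pvF l ic.2)
        && (decide (pvF l ic.2 ≠ pvL l ic.2)
          && decide (((List.count ic.2 (PySem.List.slice l (some (pvF l ic.2))
                (some (pvL l ic.2 + 1)))) : Int) = pvL l ic.2 - pvF l ic.2 + 1)))
      (PySem.List.enumerate l 0) := by
    apply List.filter_congr
    intro ic hic
    obtain ⟨k, hk, rfl⟩ := (PySem.List.mem_enumerate_iff l 0 ic).mp hic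
    have hcm : l[k] ∈ l := List.getElem_mem hk
    obtain ⟨hgf, hgl⟩ := pvFoldA_getD l (l[k]) hcm
    simp only [hgf, hgl]
    simp [Bool.and_comm, Bool.and_assoc]
  rw [hfilA]
  have hhm : ∀ (xs : List (Int × Char)),
      (xs.head?).map (fun ic => String.ofList [ic.2])
        = ((xs.map (·.2)).head?).map (fun c => String.ofList [c]) := by
    intro xs; cases xs <;> rfl
  rw [hhm]
  have hfe := pvFilter_enum l
    (fun c => decide (pvF l c ≠ pvL l c)
      && decide (((List.count c (PySem.List.slice l (some (pvF l c)) (some (pvL l c + 1)))) : Int)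
        = pvL l c - pvF l c + 1))
    l.length (le_refl _)
  rw [List.take_length] at hfe
  rw [hfe]
  rw [List.filter_map, List.head?_map]
  have hmapmap : ∀ (o : Option Char),
      Option.map (fun p : Char × Int × Int × Int => String.ofList [p.1])
        (Option.map (fun c => (c, pvF l c, pvL l c, (List.count c l : Int))) o)
      = Option.map (fun c => String.ofList [c]) o := by
    intro o; cases o <;> rfl
  rw [hmapmap]
  have hfinal : List.filter
      (fun c => decide (pvF l c ≠ pvL l c)
        && decide (((List.count c (PySem.List.slice l (some (pvF l c)) (some (pvL l c + 1)))) : Int)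
          = pvL l c - pvF l c + 1))
      (PySem.Set.ofList l)
    = List.filter
      ((fun p : Char × Int × Int × Int => decide (2 ≤ p.2.2.2 ∧ p.2.2.2 = p.2.2.1 - p.2.1 + 1))
        ∘ (fun c => (c, pvF l c, pvL l c, (List.count c l : Int))))
      (PySem.Set.ofList l) := by
    apply List.filter_congr
    intro c hc
    have hcl : c ∈ l := (PySem.Set.mem_ofList l c).mp hc
    simp only [Function.comp]
    rw [pvSlice_count l c hcl]
    have hdec : decide (pvF l c ≠ pvL l c) = decide (2 ≤ (List.count c l : Int)) := by
      simp only [decide_eq_decide]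
      exact pvTwo_iff l c hcl
    rw [hdec]
    simp
  rw [hfinal]
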